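-- pv_equiv track=rewrite | github.com/diegosimao/Personalized-Training-Assistant-Agent | src/main.py | extract_workouts_from_plan
-- ===== SOURCE A (Python) =====
-- def extract_workouts_from_plan(plan_text):
--     """Extracts individual workouts from the plan text"""
--     # Basic implementation - may need adjustment based on your plan format
--     workouts = []
--     current_workout = {}
--
--     for line in plan_text.split('\n'):
--         if "Day" in line and ":" in line:
--             if current_workout:
--                 workouts.append(current_workout)
--             current_workout = {"original_text": line}
--         elif current_workout:
--             current_workout["details"] = current_workout.get("details", "") + line + "\n"
--
--     if current_workout:
--         workouts.append(current_workout)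
--
--     return workouts
-- ===== SOURCE B (Python) =====
-- def extract_workouts_from_plan(plan_text):
--     """Extracts individual workouts from the plan text (single backward pass)."""
--     out = []
--     body_rev = []
--     for line in reversed(plan_text.split('\n')):
--         if "Day" in line and ":" in line:
--             workout = {"original_text": line}
--             if body_rev:
--                 workout["details"] = "".join(l + "\n" for l in reversed(body_rev))
--             out.append(workout)
--             body_rev = []
--         else:
--             body_rev.append(line)
--     out.reverse()
--     return out
-- ===== Notes on version B (the rewrite author's own statement) =====
-- stated objective: alternative
-- what changed: A scans forward mutating an open current-workout dict (appending each line to a growing details string and flushing the dict at the next header); B makes a single backward pass that stacks pending body lines and emits each complete workout, with its details joined in one step, when its header line is reached.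
import Mathlib
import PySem

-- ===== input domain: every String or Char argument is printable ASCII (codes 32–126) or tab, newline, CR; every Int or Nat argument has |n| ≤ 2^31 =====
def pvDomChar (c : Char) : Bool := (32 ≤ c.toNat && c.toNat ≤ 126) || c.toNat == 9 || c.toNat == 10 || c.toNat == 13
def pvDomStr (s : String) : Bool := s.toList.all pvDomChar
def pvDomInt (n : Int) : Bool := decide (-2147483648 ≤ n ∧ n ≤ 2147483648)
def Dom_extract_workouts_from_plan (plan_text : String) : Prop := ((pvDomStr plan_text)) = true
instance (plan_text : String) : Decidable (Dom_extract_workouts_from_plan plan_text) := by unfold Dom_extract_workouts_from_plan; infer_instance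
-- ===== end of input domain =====

-- B replaces A's forward scan (which mutates an open current-workout dict line by line) with a
-- single backward pass that collects pending body lines and emits each finished workout at its
-- header; objective: alternative decomposition, same return value.

-- ===== PORT A =====
-- '"Day" in line and ":" in line'
def pvIsHeader (line : String) : Bool := PySem.Str.isIn "Day" line && PySem.Str.isIn ":" line

-- one iteration of A's for-loop; state = (workouts, current_workout); 'if current_workout:' is size ≠ 0
def pvStepA (st : List (PySem.Dict String String) × PySem.Dict String String) (line : String) :
    List (PySem.Dict String String) × PySem.Dict String String :=
  if pvIsHeader line then
    ((if st.2.size ≠ 0 then st.1 ++ [st.2] else st.1), PySem.Dict.ofList [("original_text", line)])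
  else if st.2.size ≠ 0 then
    (st.1, st.2.insert "details" (st.2.getD "details" "" ++ line ++ "\n"))
  else st

def extract_workouts_from_plan (plan_text : String) : List (List (String × String)) :=
  let lines := (PySem.Str.split? plan_text "\n").getD []
  let st := lines.foldl pvStepA ([], PySem.Dict.empty)
  let workouts := if st.2.size ≠ 0 then st.1 ++ [st.2] else st.1
  workouts.map (·.items)

-- ===== PORT B =====
-- build one finished workout from its header line and the pending body lines (stored reversed)
def pvMkB (line : String) (bodyRev : List String) : PySem.Dict String String :=
  let w := PySem.Dict.ofList [("original_text", line)]
  if bodyRev ≠ [] then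
    w.insert "details" (PySem.Str.join "" (bodyRev.reverse.map (fun l => l ++ "\n")))
  else w

-- one iteration of B's backward for-loop; state = (out, body_rev)
def pvStepB (st : List (PySem.Dict String String) × List String) (line : String) :
    List (PySem.Dict String String) × List String :=
  if pvIsHeader line then (st.1 ++ [pvMkB line st.2], []) else (st.1, st.2 ++ [line])

def extract_workouts_from_plan_alt (plan_text : String) : List (List (String × String)) :=
  let lines := (PySem.Str.split? plan_text "\n").getD []
  let st := lines.reverse.foldl pvStepB ([], [])
  st.1.reverse.map (·.items)

-- ===== PRECONDITION & SPEC =====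
def Spec_extract_workouts_from_plan (plan_text : String) (out : List (List (String × String))) : Prop := out = extract_workouts_from_plan_alt plan_text
instance (plan_text : String) (out : List (List (String × String))) : Decidable (Spec_extract_workouts_from_plan plan_text out) := by unfold Spec_extract_workouts_from_plan; infer_instance

-- ===== CLAIM (what is proved, stated in full; the proofs are below) =====
def Claim_equal_extract_workouts_from_plan : Prop := ∀ (plan_text : String), Dom_extract_workouts_from_plan plan_text → Spec_extract_workouts_from_plan plan_text (extract_workouts_from_plan plan_text)

-- ===== LEMMAS AND PROOFS =====

-- the current workout after header h, with optionally an accumulated details string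
def pvCur (h : String) (d : Option String) : PySem.Dict String String :=
  match d with
  | none => PySem.Dict.ofList [("original_text", h)]
  | some s => (PySem.Dict.ofList [("original_text", h)]).insert "details" s

def pvJoinBody (body : List String) : String := PySem.Str.join "" (body.map (fun l => l ++ "\n"))

-- the finished workout for header h, prior details d, and the following body lines
def pvMkW (h : String) (d : Option String) (body : List String) : PySem.Dict String String :=
  if d = none ∧ body = [] then PySem.Dict.ofList [("original_text", h)]
  else (PySem.Dict.ofList [("original_text", h)]).insert "details" (d.getD "" ++ pvJoinBody body)

-- reference recursion: one workout per header line, body = the following non-header lines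
def pvR : List String → List (PySem.Dict String String)
  | [] => []
  | l :: ls =>
      if pvIsHeader l then pvMkW l none (ls.takeWhile (fun x => !pvIsHeader x)) :: pvR ls
      else pvR ls

def pvFinishA (st : List (PySem.Dict String String) × PySem.Dict String String) :
    List (PySem.Dict String String) :=
  if st.2.size ≠ 0 then st.1 ++ [st.2] else st.1

lemma pvCur_size (h : String) (d : Option String) : (pvCur h d).size ≠ 0 := by
  cases d <;>
    simp [pvCur, PySem.Dict.ofList, PySem.Dict.update, PySem.Dict.insert, PySem.Dict.contains,
      PySem.Dict.empty, PySem.Dict.size]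

lemma pvCur_getD (h : String) (d : Option String) :
    (pvCur h d).getD "details" "" = d.getD "" := by
  cases d <;>
    simp [pvCur, PySem.Dict.ofList, PySem.Dict.update, PySem.Dict.insert, PySem.Dict.contains,
      PySem.Dict.empty, PySem.Dict.getD, PySem.Dict.get?]

lemma pvCur_insert (h s : String) (d : Option String) :
    (pvCur h d).insert "details" s = pvCur h (some s) := by
  cases d <;>
    simp [pvCur, PySem.Dict.ofList, PySem.Dict.update, PySem.Dict.insert, PySem.Dict.contains,
      PySem.Dict.empty]

lemma flatten_intersperse_nil : ∀ xs : List (List Char), (List.intersperse [] xs).flatten = xs.flatten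
  | [] => rfl
  | [a] => by simp
  | a :: b :: t => by
      simp only [List.intersperse, List.flatten_cons]
      simp [flatten_intersperse_nil (b :: t)]

lemma pv_join_cons (x : String) (l : List String) :
    PySem.Str.join "" (x :: l) = x ++ PySem.Str.join "" l := by
  simp [PySem.Str.join, PySem.Chars.join, List.intercalate, flatten_intersperse_nil,
    String.ofList_append, String.ofList_toList]

lemma pvJoinBody_cons (l : String) (b : List String) :
    pvJoinBody (l :: b) = (l ++ "\n") ++ pvJoinBody b := by
  simp [pvJoinBody, pv_join_cons]

lemma pvMkW_nil (h : String) (d : Option String) : pvMkW h d [] = pvCur h d := by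
  cases d with
  | none => simp [pvMkW, pvCur]
  | some s => simp [pvMkW, pvCur, pvJoinBody, PySem.Str.join, PySem.Chars.join, List.intercalate,
      String.append_empty]

lemma pvMkW_cons (h l : String) (d : Option String) (b : List String) :
    pvMkW h d (l :: b) = pvMkW h (some (d.getD "" ++ l ++ "\n")) b := by
  simp [pvMkW, pvJoinBody_cons, String.append_assoc]

lemma pvA_shift (ls : List String) : ∀ ws cur,
    pvFinishA (ls.foldl pvStepA (ws, cur)) = ws ++ pvFinishA (ls.foldl pvStepA ([], cur)) := by
  induction ls with
  | nil =>
      intro ws cur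
      by_cases hc : cur.size = 0 <;> simp [pvFinishA, hc]
  | cons l ls ih =>
      intro ws cur
      simp only [List.foldl_cons, pvStepA]
      split_ifs with h1 h2 h2
      · rw [ih (ws ++ [cur]), ih ([] ++ [cur])]
        simp
      · rw [ih ws]
      · rw [ih ws]
      · rw [ih ws]

lemma pvA_open (ls : List String) : ∀ h d,
    pvFinishA (ls.foldl pvStepA ([], pvCur h d)) =
      pvMkW h d (ls.takeWhile (fun x => !pvIsHeader x)) :: pvR ls := by
  induction ls with
  | nil =>
      intro h d
      simp [pvFinishA, pvCur_size h d, pvMkW_nil, pvR]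
  | cons l ls ih =>
      intro h d
      simp only [List.foldl_cons]
      by_cases hh : pvIsHeader l = true
      · have hstep : pvStepA ([], pvCur h d) l =
            ([pvCur h d], PySem.Dict.ofList [("original_text", l)]) := by
          simp [pvStepA, hh, pvCur_size h d]
        rw [hstep]
        have : (PySem.Dict.ofList [("original_text", l)]) = pvCur l none := rfl
        rw [this, pvA_shift, ih l none]
        simp [List.takeWhile, hh, pvMkW_nil, pvR]
      · have hstep : pvStepA ([], pvCur h d) l =
            ([], pvCur h (some (d.getD "" ++ l ++ "\n"))) := by
          simp [pvStepA, hh, pvCur_size h d, pvCur_getD, pvCur_insert]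
        rw [hstep, ih]
        simp [List.takeWhile, hh, pvMkW_cons, pvR]

lemma pvA_closed (ls : List String) :
    pvFinishA (ls.foldl pvStepA ([], PySem.Dict.empty)) = pvR ls := by
  induction ls with
  | nil => simp [pvFinishA, PySem.Dict.empty, PySem.Dict.size, pvR]
  | cons l ls ih =>
      simp only [List.foldl_cons]
      by_cases hh : pvIsHeader l = true
      · have hstep : pvStepA ([], PySem.Dict.empty) l =
            ([], pvCur l none) := by
          simp [pvStepA, hh, PySem.Dict.empty, PySem.Dict.size, pvCur]
        rw [hstep, pvA_open]
        simp [pvR, hh]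
      · have hstep : pvStepA ([], PySem.Dict.empty) l = ([], PySem.Dict.empty) := by
          simp [pvStepA, hh, PySem.Dict.empty, PySem.Dict.size]
        rw [hstep, ih]
        simp [pvR, hh]

lemma pvMkB_reverse (l : String) (b : List String) :
    pvMkB l b.reverse = pvMkW l none b := by
  cases b with
  | nil => simp [pvMkB, pvMkW]
  | cons x xs =>
      simp [pvMkB, pvMkW, pvJoinBody, String.empty_append]

lemma pvB_char (ls : List String) :
    ls.foldr (fun line st => pvStepB st line) ([], []) =
      ((pvR ls).reverse, (ls.takeWhile (fun x => !pvIsHeader x)).reverse) := by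
  induction ls with
  | nil => simp [pvR]
  | cons l ls ih =>
      simp only [List.foldr_cons, ih]
      by_cases hh : pvIsHeader l = true
      · have : pvMkB l ((ls.takeWhile (fun x => !pvIsHeader x)).reverse) =
            pvMkW l none (ls.takeWhile (fun x => !pvIsHeader x)) := by
          rw [pvMkB_reverse]
        simp [pvStepB, hh, pvR, List.takeWhile, this]
      · simp [pvStepB, hh, pvR, List.takeWhile]

-- ===== VERDICT (by name: the statement is the Claim_ definition above) =====
theorem extract_workouts_from_plan_spec : Claim_equal_extract_workouts_from_plan := by
  intro plan_text _
  unfold Spec_extract_workouts_from_plan extract_workouts_from_plan extract_workouts_from_plan_alt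
  set ls := (PySem.Str.split? plan_text "\n").getD [] with hls
  have hA : (let st := ls.foldl pvStepA ([], PySem.Dict.empty);
      if st.2.size ≠ 0 then st.1 ++ [st.2] else st.1) = pvR ls := pvA_closed ls
  have hB := pvB_char ls
  simp only [List.foldl_reverse]
  rw [hA]
  rw [show (fun (x : String) (y : List (PySem.Dict String String) × List String) => pvStepB y x) =
      (fun line st => pvStepB st line) from rfl, hB]
  simp
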